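-- pv_equiv track=rewrite | github.com/logpai/logparser | logparser/SLCT/src/SLCT.py | matchTempLog
-- ===== SOURCE A (Python) =====
-- def matchTempLog(templates, logs):
--     len_temp = {}
--     for tidx, temp in enumerate(templates):
--         tempL = temp.split()
--         templen = len(tempL)
--         if templen not in len_temp:
--             len_temp[templen] = [(tidx, tempL)]
--         else:
--             len_temp[templen].append((tidx, tempL))
--     logid_groupid = []
--     for idx, log in enumerate(logs):
--         logL = log.split()
--         logid = idx + 1
--         if len(logL) in len_temp:
--             logid_groupid.append([idx + 1, get_groupid(logL, len_temp[len(logL)])])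
--         else:
--             logid_groupid.append([idx + 1, -1])
--
--     return logid_groupid
--
-- def get_groupid(logL, tempLs):
--     maxvalue = -1
--     for templ in tempLs:
--         starnum = 0
--         shot = 0
--         for idx, token in enumerate(logL):
--             if token == templ[1][idx] or templ[1][idx].count("*"):
--                 shot += 1
--             if templ[1][idx].count("*"):
--                 starnum += 1
--         shot = shot - starnum
--         if shot > maxvalue:
--             maxvalue = shot
--             groupid = templ[0]
--     return groupid
-- ===== SOURCE B (Python) =====
-- def matchTempLog(templates, logs):
--     # Inverted index: per token length keep the group's template ids and a map
--     # (position, token) -> in-group slots of templates with that exact (non-wildcard)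
--     # token there; per log, per-position lookups accumulate match counts, so the
--     # per-template-per-position rescan of A disappears.
--     groups = {}  # token length -> [tidxs, index]
--     for tidx, temp in enumerate(templates):
--         toks = temp.split()
--         n = len(toks)
--         if n not in groups:
--             groups[n] = [[], {}]
--         g = groups[n]
--         j = len(g[0])
--         g[0].append(tidx)
--         index = g[1]
--         for pos, tok in enumerate(toks):
--             if tok.count("*") == 0:
--                 index.setdefault((pos, tok), []).append(j)
--     result = []
--     for idx, log in enumerate(logs):
--         toks = log.split()
--         g = groups.get(len(toks))
--         if g is None:
--             result.append([idx + 1, -1])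
--             continue
--         tidxs, index = g
--         counts = {}
--         for pos, tok in enumerate(toks):
--             for j in index.get((pos, tok), ()):
--                 counts[j] = counts.get(j, 0) + 1
--         best_j, best_c = 0, counts.get(0, 0)
--         for j in range(1, len(tidxs)):
--             c = counts.get(j, 0)
--             if c > best_c:
--                 best_j, best_c = j, c
--         result.append([idx + 1, tidxs[best_j]])
--     return result
-- ===== Notes on version B (the rewrite author's own statement) =====
-- stated objective: faster
-- what changed: Replaces A's per-log rescan of every same-length template's every token by an inverted index (length, position, token) -> matching template slots built once, so each log only accumulates per-position hit counts and scans one count per candidate template.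
import Mathlib
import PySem

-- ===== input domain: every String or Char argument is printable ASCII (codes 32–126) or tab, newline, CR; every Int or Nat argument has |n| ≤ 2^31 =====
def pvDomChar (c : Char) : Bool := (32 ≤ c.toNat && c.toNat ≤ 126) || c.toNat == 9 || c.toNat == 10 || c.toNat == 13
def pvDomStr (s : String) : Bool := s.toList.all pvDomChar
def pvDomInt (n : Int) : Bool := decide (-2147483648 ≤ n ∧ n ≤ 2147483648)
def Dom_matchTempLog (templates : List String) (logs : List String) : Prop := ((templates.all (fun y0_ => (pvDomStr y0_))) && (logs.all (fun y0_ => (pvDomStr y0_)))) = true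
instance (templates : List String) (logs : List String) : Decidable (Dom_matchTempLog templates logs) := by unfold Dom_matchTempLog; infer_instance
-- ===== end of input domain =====

-- B replaces A's per-log scan of every same-length template's every token by an
-- inverted index (token length, position, token) → template slots built once;
-- per log it accumulates per-position hit counts and picks the first strict maximum.

-- ===== PORT A =====
-- Literal port of get_groupid.  templ[1][idx] is ported with pyGetD; at the only
-- call site (inside matchTempLog) templ[1] and logL always have the same length,
-- so the default is never the result where Python would raise.  Python's unbound
-- 'groupid' is seeded with 0: it is always overwritten when tempLs ≠ [] (shot ≥ 0 > -1),
-- and matchTempLog only calls with tempLs ≠ [].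
def pvGetGroupid (logL : List String) (tempLs : List (Int × List String)) : Int :=
  (tempLs.foldl (fun (st : Int × Int) templ =>
      let s2 := (PySem.List.enumerate logL).foldl (fun (ss : Int × Int) q =>
          (if PySem.Str.count (PySem.List.pyGetD templ.2 q.1 "") "*" != 0 then ss.1 + 1 else ss.1,
           if q.2 == PySem.List.pyGetD templ.2 q.1 "" || PySem.Str.count (PySem.List.pyGetD templ.2 q.1 "") "*" != 0 then ss.2 + 1 else ss.2))
        ((0 : Int), (0 : Int))
      let shot := s2.2 - s2.1
      if shot > st.1 then (shot, templ.1) else st) ((-1 : Int), (0 : Int))).2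

-- the body of A's first loop (build of len_temp)
def pvStepA (d : PySem.Dict Int (List (Int × List String))) (p : Int × String) :
    PySem.Dict Int (List (Int × List String)) :=
  let tempL := PySem.Str.split₀ p.2
  let templen : Int := (tempL.length : Int)
  if d.contains templen = false then d.insert templen [(p.1, tempL)]
  else d.modify templen [] (fun l => l ++ [(p.1, tempL)])

def matchTempLog (templates : List String) (logs : List String) : List (List Int) :=
  let len_temp := (PySem.List.enumerate templates).foldl pvStepA PySem.Dict.empty
  (PySem.List.enumerate logs).foldl (fun acc p =>
      let logL := PySem.Str.split₀ p.2
      if len_temp.contains ((logL.length : Int)) then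
        acc ++ [[p.1 + 1, pvGetGroupid logL (len_temp.getD ((logL.length : Int)) [])]]
      else acc ++ [[p.1 + 1, -1]]) []

-- ===== PORT B =====
-- the body of B's first loop: group append + inverted-index update
def pvStepB (d : PySem.Dict Int (List Int × PySem.Dict (Int × String) (List Int))) (p : Int × String) :
    PySem.Dict Int (List Int × PySem.Dict (Int × String) (List Int)) :=
  let toks := PySem.Str.split₀ p.2
  let n : Int := (toks.length : Int)
  let d1 := if d.contains n = false then d.insert n ([], PySem.Dict.empty) else d
  let g := d1.getD n ([], PySem.Dict.empty)
  let j : Int := (g.1.length : Int)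
  let index := (PySem.List.enumerate toks).foldl (fun ix q =>
      if PySem.Str.count q.2 "*" == 0 then ix.modify (q.1, q.2) [] (fun l => l ++ [j]) else ix) g.2
  d1.insert n (g.1 ++ [p.1], index)

def matchTempLog_alt (templates : List String) (logs : List String) : List (List Int) :=
  let groups := (PySem.List.enumerate templates).foldl pvStepB PySem.Dict.empty
  (PySem.List.enumerate logs).foldl (fun acc p =>
      let toks := PySem.Str.split₀ p.2
      match groups.get? ((toks.length : Int)) with
      | none => acc ++ [[p.1 + 1, -1]]
      | some g =>
        let counts := (PySem.List.enumerate toks).foldl (fun cs q =>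
            (g.2.getD (q.1, q.2) []).foldl
              (fun (cs : PySem.Dict Int Int) j => cs.modify j 0 (· + 1)) cs) PySem.Dict.empty
        let best := (PySem.List.pyRange 1 ((g.1.length : Int))).foldl (fun (b : Int × Int) j =>
            let c := counts.getD j 0
            if c > b.2 then (j, c) else b) ((0 : Int), counts.getD 0 0)
        acc ++ [[p.1 + 1, PySem.List.pyGetD g.1 best.1 (-1)]]) []

-- ===== PRECONDITION & SPEC =====
def Spec_matchTempLog (templates : List String) (logs : List String) (out : List (List Int)) : Prop := out = matchTempLog_alt templates logs
instance (templates : List String) (logs : List String) (out : List (List Int)) : Decidable (Spec_matchTempLog templates logs out) := by unfold Spec_matchTempLog; infer_instance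

-- ===== CLAIM (what is proved, stated in full; the proofs are below) =====
def Claim_equal_matchTempLog : Prop := ∀ (templates : List String) (logs : List String), Dom_matchTempLog templates logs → Spec_matchTempLog templates logs (matchTempLog templates logs)

-- ===== LEMMAS AND PROOFS =====

-- star test of a template token, as both ports compute it
def pvStar (t : String) : Bool := PySem.Str.count t "*" != 0

-- templates of a given token length, tokenized, with their original indices, in order
def pvGroupL (l : List (Int × String)) (n : Int) : List (Int × List String) :=
  (l.map (fun p => (p.1, PySem.Str.split₀ p.2))).filter (fun q => ((q.2.length : Int) == n))

-- A's score of a template against a log line: shot - starnum = #positions with an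
-- exact match on a star-free template token
def pvScore (logL : List String) (tempL : List String) : Int :=
  ((PySem.List.enumerate logL).countP (fun q =>
      q.2 == PySem.List.pyGetD tempL q.1 "" && !pvStar (PySem.List.pyGetD tempL q.1 "")) : Int)

-- does template token list `toks` put exact star-free token `t` at position `pos`?
def pvHit (toks : List String) (pos : Int) (t : String) : Bool :=
  decide (0 ≤ pos) && (toks[pos.toNat]? == some t) && (PySem.Str.count t "*" == 0)

-- the inverted index of a group is characterised by pvHit
def pvIdxSpec (G : List (Int × List String)) (ix : PySem.Dict (Int × String) (List Int)) : Prop :=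
  ∀ (pos : Int) (t : String),
    ix.getD (pos, t) [] =
      ((PySem.List.enumerate G).filter (fun r => pvHit r.2.2 pos t)).map (fun r => r.1)

-- the per-log value appended by A's second loop
def pvValA (templates : List String) (p : Int × String) : List Int :=
  let logL := PySem.Str.split₀ p.2
  if ((PySem.List.enumerate templates).foldl pvStepA PySem.Dict.empty).contains ((logL.length : Int)) then
    [p.1 + 1, pvGetGroupid logL
      (((PySem.List.enumerate templates).foldl pvStepA PySem.Dict.empty).getD ((logL.length : Int)) [])]
  else [p.1 + 1, -1]

-- the per-log value appended by B's second loop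
def pvValB (templates : List String) (p : Int × String) : List Int :=
  let toks := PySem.Str.split₀ p.2
  match ((PySem.List.enumerate templates).foldl pvStepB PySem.Dict.empty).get? ((toks.length : Int)) with
  | none => [p.1 + 1, -1]
  | some g =>
    let counts := (PySem.List.enumerate toks).foldl (fun cs q =>
        (g.2.getD (q.1, q.2) []).foldl
          (fun (cs : PySem.Dict Int Int) j => cs.modify j 0 (· + 1)) cs) PySem.Dict.empty
    let best := (PySem.List.pyRange 1 ((g.1.length : Int))).foldl (fun (b : Int × Int) j =>
        let c := counts.getD j 0
        if c > b.2 then (j, c) else b) ((0 : Int), counts.getD 0 0)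
    [p.1 + 1, PySem.List.pyGetD g.1 best.1 (-1)]

lemma pv_countP_or (l : List α) (p q : α → Bool) :
    l.countP (fun x => p x || q x) = l.countP (fun x => p x && !q x) + l.countP q := by
  induction l with
  | nil => simp
  | cons h t ih =>
    by_cases hp : p h <;> by_cases hq : q h <;> simp [hp, hq, ih] <;> omega

lemma pvGetGroupid_eq (logL : List String) (tempLs : List (Int × List String)) :
    pvGetGroupid logL tempLs =
      (tempLs.foldl (fun (st : Int × Int) templ =>
          if pvScore logL templ.2 > st.1 then (pvScore logL templ.2, templ.1) else st)
        ((-1 : Int), (0 : Int))).2 := by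
  unfold pvGetGroupid
  congr 1
  apply PySem.List.foldl_congr_mem
  intro st templ _hm
  rw [PySem.List.foldl_prod_mk
        (f := fun (a : Int) (q : Int × String) => if PySem.Str.count (PySem.List.pyGetD templ.2 q.1 "") "*" != 0 then a + 1 else a)
        (g := fun (a : Int) (q : Int × String) => if q.2 == PySem.List.pyGetD templ.2 q.1 "" || PySem.Str.count (PySem.List.pyGetD templ.2 q.1 "") "*" != 0 then a + 1 else a)]
  rw [PySem.List.foldl_if_add_one, PySem.List.foldl_if_add_one]
  have h := pv_countP_or (PySem.List.enumerate logL)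
      (fun q => q.2 == PySem.List.pyGetD templ.2 q.1 "")
      (fun q => PySem.Str.count (PySem.List.pyGetD templ.2 q.1 "") "*" != 0)
  have hsc : pvScore logL templ.2 =
      (((PySem.List.enumerate logL).countP (fun q => q.2 == PySem.List.pyGetD templ.2 q.1 "" || PySem.Str.count (PySem.List.pyGetD templ.2 q.1 "") "*" != 0) : Int)
        - ((PySem.List.enumerate logL).countP (fun q => PySem.Str.count (PySem.List.pyGetD templ.2 q.1 "") "*" != 0) : Int)) := by
    simp only [pvScore, pvStar, h]; push_cast; ring
  simp only [hsc]
  push_cast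
  ring_nf

lemma pvStepA_getD (d : PySem.Dict Int (List (Int × List String))) (p : Int × String) (n : Int) :
    (pvStepA d p).getD n [] = d.getD n [] ++
      (if ((PySem.Str.split₀ p.2).length : Int) = n then [(p.1, PySem.Str.split₀ p.2)] else []) := by
  unfold pvStepA
  by_cases hn : ((PySem.Str.split₀ p.2).length : Int) = n
  · subst hn
    by_cases hc : d.contains ((PySem.Str.split₀ p.2).length : Int) = false
    · simp [hc, PySem.Dict.getD_insert, PySem.Dict.getD_of_not_contains d _ hc]
    · simp [hc, PySem.Dict.getD_modify]
  · have hn' : ¬ (n = ((PySem.Str.split₀ p.2).length : Int)) := fun h => hn h.symm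
    by_cases hc : d.contains ((PySem.Str.split₀ p.2).length : Int) = false
    · simp [hc, PySem.Dict.getD_insert, hn, hn']
    · simp [hc, PySem.Dict.getD_modify, hn, hn']

lemma pvA_getD (l : List (Int × String)) (d : PySem.Dict Int (List (Int × List String))) (n : Int) :
    (l.foldl pvStepA d).getD n [] = d.getD n [] ++ pvGroupL l n := by
  induction l generalizing d with
  | nil => simp [pvGroupL]
  | cons h t ih =>
    rw [List.foldl_cons, ih, pvStepA_getD]
    simp only [pvGroupL, List.map_cons, List.filter_cons]
    by_cases hn : ((PySem.Str.split₀ h.2).length : Int) = n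
    · simp [hn]
    · simp [hn]

lemma pvStepA_contains (d : PySem.Dict Int (List (Int × List String))) (p : Int × String) (n : Int) :
    (pvStepA d p).contains n = (n == ((PySem.Str.split₀ p.2).length : Int) || d.contains n) := by
  unfold pvStepA
  by_cases hc : d.contains ((PySem.Str.split₀ p.2).length : Int) = false
  · simp [hc, PySem.Dict.contains_insert]
  · rw [Bool.not_eq_false] at hc
    simp only [hc]
    rw [if_neg (by simp), PySem.Dict.contains_modify]

lemma pvA_contains (l : List (Int × String)) (d : PySem.Dict Int (List (Int × List String))) (n : Int) :
    (l.foldl pvStepA d).contains n = (d.contains n || !(pvGroupL l n).isEmpty) := by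
  induction l generalizing d with
  | nil => simp [pvGroupL]
  | cons h t ih =>
    rw [List.foldl_cons, ih, pvStepA_contains]
    simp only [pvGroupL, List.map_cons, List.filter_cons]
    by_cases hn : ((PySem.Str.split₀ h.2).length : Int) = n
    · simp [hn]
    · have hn' : ¬ (n = ((PySem.Str.split₀ h.2).length : Int)) := fun h => hn h.symm
      have hb : (n == ((PySem.Str.split₀ h.2).length : Int)) = false := by simp [hn']
      simp [hn, hb]

lemma pvIdxFoldAux (j : Int) (pos : Int) (t : String) (toks : List String) :
    ∀ (s : Int) (ix : PySem.Dict (Int × String) (List Int)),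
    ((PySem.List.enumerate toks s).foldl (fun ix q =>
        if PySem.Str.count q.2 "*" == 0 then ix.modify (q.1, q.2) [] (fun l => l ++ [j]) else ix) ix).getD (pos, t) []
    = ix.getD (pos, t) [] ++
      (if decide (s ≤ pos) && (toks[(pos - s).toNat]? == some t) && (PySem.Str.count t "*" == 0) then [j] else []) := by
  induction toks with
  | nil => intro s ix; simp
  | cons tok rest ih =>
    intro s ix
    rw [PySem.List.enumerate_cons, List.foldl_cons, ih]
    by_cases hps : pos = s
    · subst hps
      have h0 : (pos - pos).toNat = 0 := by omega
      have hr : ¬ ((pos + 1 : Int) ≤ pos) := by omega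
      by_cases hst : (PySem.Str.count tok "*" == 0) = true
      · simp only [hst, if_true, PySem.Dict.getD_modify]
        by_cases htk : t = tok
        · subst htk
          simp [h0, hr]
          simpa using hst
        · have hk : ¬ ((pos, t) = (pos, tok)) := by simp [htk]
          have hne : ((tok :: rest)[(pos - pos).toNat]? == some t) = false := by
            simp [h0]; intro h; exact absurd h.symm htk
          simp [hk, hr, hne]
          intro h; exact absurd h.symm htk
      · have hb : (PySem.Str.count tok "*" == 0) = false := by simpa using hst
        simp only [hb, if_false]
        by_cases htk : t = tok
        · subst htk
          simp [h0, hr]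
          simpa using hb
        · have hne : ((tok :: rest)[(pos - pos).toNat]? == some t) = false := by
            simp [h0]; intro h; exact absurd h.symm htk
          simp [hr, hne]
          intro h; exact absurd h.symm htk
    · have hshift : (decide ((s + 1 : Int) ≤ pos) && (rest[(pos - (s+1)).toNat]? == some t))
          = (decide (s ≤ pos) && ((tok :: rest)[(pos - s).toNat]? == some t)) := by
        by_cases hle : (s + 1 : Int) ≤ pos
        · have hle' : s ≤ pos := by omega
          have hidx : (pos - s).toNat = (pos - (s+1)).toNat + 1 := by omega
          have d1 : decide ((s + 1 : Int) ≤ pos) = true := by simpa using hle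
          have d2 : decide (s ≤ pos) = true := by simpa using hle'
          rw [hidx]
          simp only [List.getElem?_cons_succ, d1, d2]
        · by_cases hle' : s ≤ pos
          · have : pos = s := by omega
            exact absurd this hps
          · have d1 : decide ((s + 1 : Int) ≤ pos) = false := by simpa using hle
            have d2 : decide (s ≤ pos) = false := by simpa using hle'
            simp only [d1, d2, Bool.false_and]
      have hkey : ¬ ((pos, t) = (s, tok)) := by simp [hps]
      by_cases hst : (PySem.Str.count tok "*" == 0) = true
      · simp only [hst, if_true, PySem.Dict.getD_modify, hkey, if_false]
        rw [hshift]
      · have hb : (PySem.Str.count tok "*" == 0) = false := by simpa using hst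
        simp only [hb, if_false]
        rw [hshift]
        simp

lemma pvIdxFold_getD (toks : List String) (j : Int) (ix : PySem.Dict (Int × String) (List Int))
    (pos : Int) (t : String) :
    ((PySem.List.enumerate toks).foldl (fun ix q =>
        if PySem.Str.count q.2 "*" == 0 then ix.modify (q.1, q.2) [] (fun l => l ++ [j]) else ix) ix).getD (pos, t) []
      = ix.getD (pos, t) [] ++ (if pvHit toks pos t then [j] else []) := by
  have := pvIdxFoldAux j pos t toks 0 ix
  simpa [pvHit] using this

lemma pvGroupL_append_singleton (l : List (Int × String)) (p : Int × String) (n : Int) :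
    pvGroupL (l ++ [p]) n = pvGroupL l n ++
      (if ((PySem.Str.split₀ p.2).length : Int) = n then [(p.1, PySem.Str.split₀ p.2)] else []) := by
  simp only [pvGroupL, List.map_append, List.filter_append, List.map_cons, List.map_nil,
    List.filter_cons, List.filter_nil]
  by_cases hn : ((PySem.Str.split₀ p.2).length : Int) = n
  · simp [hn]
  · simp [hn]

lemma pvIdxSpec_append (G : List (Int × List String)) (ix : PySem.Dict (Int × String) (List Int))
    (hix : pvIdxSpec G ix) (tid : Int) (toks : List String) :
    pvIdxSpec (G ++ [(tid, toks)])
      ((PySem.List.enumerate toks).foldl (fun ix q =>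
          if PySem.Str.count q.2 "*" == 0 then ix.modify (q.1, q.2) [] (fun l => l ++ [(G.length : Int)]) else ix) ix) := by
  intro pos t
  rw [pvIdxFold_getD, hix pos t]
  rw [PySem.List.enumerate_append]
  simp only [List.filter_append, List.map_append]
  congr 1
  simp only [PySem.List.enumerate_cons, PySem.List.enumerate_nil]
  by_cases hh : pvHit toks pos t
  · simp [hh]
  · simp [hh]

lemma pvB_build (l : List (Int × String)) (n : Int) :
    match (l.foldl pvStepB PySem.Dict.empty).get? n with
    | none => pvGroupL l n = []
    | some g => pvGroupL l n ≠ [] ∧ g.1 = (pvGroupL l n).map (fun r => r.1) ∧ pvIdxSpec (pvGroupL l n) g.2 := by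
  induction l using List.reverseRecOn with
  | nil => simp [pvGroupL]
  | append_singleton l p ih =>
    rw [List.foldl_append, List.foldl_cons, List.foldl_nil]
    rw [pvGroupL_append_singleton]
    simp only [pvStepB]
    by_cases hn : ((PySem.Str.split₀ p.2).length : Int) = n
    · -- the updated length class
      subst hn
      cases hD : (l.foldl pvStepB PySem.Dict.empty).get? ((PySem.Str.split₀ p.2).length : Int) with
      | none =>
        have hc : (l.foldl pvStepB PySem.Dict.empty).contains ((PySem.Str.split₀ p.2).length : Int) = false := by
          rw [PySem.Dict.contains_eq_isSome_get?, hD]; rfl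
        have hGnil : pvGroupL l ((PySem.Str.split₀ p.2).length : Int) = [] := by
          have := ih; rw [hD] at this; exact this
        simp only [hc, if_true, PySem.Dict.getD_insert_self, PySem.Dict.get?_insert_self]
        rw [hGnil]
        refine ⟨by simp, by simp, ?_⟩
        have hspec : pvIdxSpec ([] : List (Int × List String)) PySem.Dict.empty := by
          intro pos t; simp [PySem.List.enumerate_nil]
        have := pvIdxSpec_append [] PySem.Dict.empty hspec p.1 (PySem.Str.split₀ p.2)
        simpa using this
      | some g0 =>
        have hc : (l.foldl pvStepB PySem.Dict.empty).contains ((PySem.Str.split₀ p.2).length : Int) = true := by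
          rw [PySem.Dict.contains_eq_isSome_get?, hD]; rfl
        have hG := ih; rw [hD] at hG
        obtain ⟨hne, hfst, hspec⟩ := hG
        have hgetD : (l.foldl pvStepB PySem.Dict.empty).getD ((PySem.Str.split₀ p.2).length : Int) ([], PySem.Dict.empty) = g0 :=
          PySem.Dict.getD_of_get?_eq_some _ _ hD
        simp only [hc, Bool.true_eq_false, if_false, hgetD, PySem.Dict.get?_insert_self]
        have hlen : (g0.1.length : Int) = ((pvGroupL l ((PySem.Str.split₀ p.2).length : Int)).length : Int) := by
          rw [hfst]; simp
        refine ⟨by simp, by rw [hfst]; simp, ?_⟩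
        have := pvIdxSpec_append (pvGroupL l ((PySem.Str.split₀ p.2).length : Int)) g0.2 hspec p.1 (PySem.Str.split₀ p.2)
        rw [← hlen] at this
        simpa using this
    · -- an untouched length class
      have hstep : ∀ v,
          ((if (l.foldl pvStepB PySem.Dict.empty).contains ((PySem.Str.split₀ p.2).length : Int) = false
            then (l.foldl pvStepB PySem.Dict.empty).insert ((PySem.Str.split₀ p.2).length : Int) ([], PySem.Dict.empty)
            else (l.foldl pvStepB PySem.Dict.empty)).insert ((PySem.Str.split₀ p.2).length : Int) v).get? n
          = (l.foldl pvStepB PySem.Dict.empty).get? n := by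
        intro v
        rw [PySem.Dict.get?_insert]
        rw [if_neg (fun h => hn h.symm)]
        by_cases hc : (l.foldl pvStepB PySem.Dict.empty).contains ((PySem.Str.split₀ p.2).length : Int) = false
        · rw [if_pos hc, PySem.Dict.get?_insert, if_neg (fun h => hn h.symm)]
        · rw [if_neg hc]
      rw [hstep _]
      rw [if_neg hn]
      simpa using ih

lemma pv_enum_countP {α : Type} (G : List α) (P : Int × α → Bool) :
    ∀ (s : Int) (j : Nat), (hj : j < G.length) →
      (PySem.List.enumerate G s).countP (fun r => (r.1 == s + (j : Int)) && P r)
        = if P (s + (j : Int), G[j]) then 1 else 0 := by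
  induction G with
  | nil => intro s j hj; simp at hj
  | cons x xs ih =>
    intro s j hj
    rw [PySem.List.enumerate_cons, List.countP_cons]
    cases j with
    | zero =>
      have hz : (PySem.List.enumerate xs (s + 1)).countP (fun r => (r.1 == s + ((0:Nat) : Int)) && P r) = 0 := by
        rw [List.countP_eq_zero]
        intro r hr
        obtain ⟨k, hk, rfl⟩ := (PySem.List.mem_enumerate_iff xs (s+1) r).1 hr
        simp; intro h; omega
      rw [hz]
      simp
    | succ k =>
      have hne : ((s : Int) == s + ((k+1 : Nat) : Int)) = false := by simp; omega
      have harg : (s + 1) + (k : Int) = s + ((k+1 : Nat) : Int) := by push_cast; ring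
      have := ih (s+1) k (by simpa using hj)
      rw [harg] at this
      rw [this]
      simp [hne]
      exact fun h => absurd h (by omega)

lemma pv_count_map_fst {β : Type} (l : List (Int × β)) (j : Int) :
    (l.map (fun r => r.1)).count j = l.countP (fun r => r.1 == j) := by
  induction l with
  | nil => simp
  | cons h t ih => simp [List.count_cons, List.countP_cons, ih]

lemma pvCounts_getD (logL : List String) (G : List (Int × List String))
    (ix : PySem.Dict (Int × String) (List Int)) (hix : pvIdxSpec G ix)
    (hlen : ∀ r ∈ G, r.2.length = logL.length) (j : Nat) (hj : j < G.length) :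
    ((PySem.List.enumerate logL).foldl (fun cs q =>
        (ix.getD (q.1, q.2) []).foldl
          (fun (cs : PySem.Dict Int Int) j => cs.modify j 0 (· + 1)) cs) PySem.Dict.empty).getD (j : Int) 0
      = pvScore logL (G[j].2) := by
  rw [← List.foldl_flatMap, PySem.Dict.getD_foldl_modify_add_one]
  rw [PySem.Dict.getD_empty, zero_add]
  have hcount : ((PySem.List.enumerate logL).flatMap (fun q => ix.getD (q.1, q.2) [])).count (j : Int)
      = (PySem.List.enumerate logL).countP (fun q => pvHit (G[j].2) q.1 q.2) := by
    rw [List.count_flatMap]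
    have hmap : ∀ q ∈ PySem.List.enumerate logL,
        (List.count ((j : Int)) ∘ fun q => ix.getD (q.1, q.2) []) q
          = if pvHit (G[j].2) q.1 q.2 then 1 else 0 := by
      intro q _
      simp only [Function.comp_apply, hix q.1 q.2]
      rw [pv_count_map_fst, List.countP_filter]
      have := pv_enum_countP G (fun r => pvHit r.2.2 q.1 q.2) 0 j hj
      simpa using this
    rw [List.map_congr_left hmap]
    rw [← PySem.List.sum_map_ite_one_zero_nat]
  rw [hcount]
  unfold pvScore
  congr 1
  apply List.countP_congr
  intro q hq
  obtain ⟨k, hk, rfl⟩ := (PySem.List.mem_enumerate_iff logL 0 q).1 hq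
  have hT : (G[j].2).length = logL.length := hlen G[j] (by simp)
  have h0k : (0 : Int) + (k : Int) = (k : Int) := by ring
  rw [h0k]
  have hkT : k < (G[j].2).length := by omega
  have hget : (G[j].2)[(k : Int).toNat]? = some ((G[j].2)[k]) := by
    rw [Int.toNat_natCast]
    exact List.getElem?_eq_getElem hkT
  have hgetD : PySem.List.pyGetD (G[j].2) ((k : Int)) "" = (G[j].2)[k] := by
    rw [PySem.List.pyGetD_eq_getElem _ _ (by omega) (by exact_mod_cast hkT)]
    simp
  unfold pvHit pvStar
  rw [hget, hgetD]
  by_cases he : logL[k] = (G[j].2)[k]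
  · simp [he]
  · have he' : ¬ ((G[j].2)[k] = logL[k]) := fun h => he h.symm
    simp [he, he']

lemma pvSel (f : Int × List String → Int) (c : Int → Int) (A : List Int) :
    ∀ (t : List (Int × List String)) (k : Int) (bc gid bj : Int),
      PySem.List.pyGetD A bj (-1) = gid →
      (∀ (i : Nat) (hi : i < t.length), c (k + i) = f t[i] ∧ PySem.List.pyGetD A (k + i) (-1) = (t[i]).1) →
      (t.foldl (fun (st : Int × Int) templ =>
          if f templ > st.1 then (f templ, templ.1) else st) (bc, gid)).2
        = PySem.List.pyGetD A
            ((PySem.List.pyRange k (k + t.length)).foldl (fun (b : Int × Int) j =>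
              let cv := c j
              if cv > b.2 then (j, cv) else b) (bj, bc)).1 (-1)
  | [], k, bc, gid, bj, hbj, hfam => by
    have hnil : PySem.List.pyRange k (k + ((0:Nat) : Int)) = [] := by
      rw [PySem.List.pyRange_one_eq_nil]; omega
    simp only [List.length_nil, Nat.cast_zero] at *
    rw [hnil]
    simpa using hbj.symm
  | h :: t', k, bc, gid, bj, hbj, hfam => by
    have hck : c k = f h := by
      have := (hfam 0 (by simp)).1
      simpa using this
    have hgk : PySem.List.pyGetD A k (-1) = h.1 := by
      have := (hfam 0 (by simp)).2
      simpa using this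
    have hcons : PySem.List.pyRange k (k + ((h :: t').length : Int))
        = k :: PySem.List.pyRange (k + 1) ((k + 1) + (t'.length : Int)) := by
      rw [PySem.List.pyRange_one_cons (by simp only [List.length_cons]; push_cast; omega)]
      have harg : k + (((h :: t').length : Nat) : Int) = (k + 1) + ((t'.length : Nat) : Int) := by
        simp only [List.length_cons]; push_cast; ring
      rw [harg]
    rw [hcons, List.foldl_cons, List.foldl_cons]
    simp only [hck]
    have hfam' : ∀ (i : Nat) (hi : i < t'.length),
        c ((k + 1) + i) = f t'[i] ∧ PySem.List.pyGetD A ((k + 1) + i) (-1) = (t'[i]).1 := by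
      intro i hi
      have := hfam (i + 1) (by simpa using Nat.succ_lt_succ hi)
      have harg : k + ((i + 1 : Nat) : Int) = (k + 1) + (i : Int) := by push_cast; ring
      rw [harg] at this
      simpa using this
    by_cases hgt : f h > bc
    · rw [if_pos hgt, if_pos hgt]
      exact pvSel f c A t' (k + 1) (f h) h.1 k hgk hfam'
    · rw [if_neg hgt, if_neg hgt]
      exact pvSel f c A t' (k + 1) bc gid bj hbj hfam'


lemma pv_foldA (templates : List String) (l : List (Int × String)) :
    ∀ (acc : List (List Int)),
      l.foldl (fun acc p =>
        let logL := PySem.Str.split₀ p.2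
        if ((PySem.List.enumerate templates).foldl pvStepA PySem.Dict.empty).contains ((logL.length : Int)) then
          acc ++ [[p.1 + 1, pvGetGroupid logL
            (((PySem.List.enumerate templates).foldl pvStepA PySem.Dict.empty).getD ((logL.length : Int)) [])]]
        else acc ++ [[p.1 + 1, -1]]) acc
      = acc ++ l.map (pvValA templates) := by
  induction l with
  | nil => intro acc; simp
  | cons q t ih =>
    intro acc
    rw [List.foldl_cons, List.map_cons]
    have hbody : (let logL := PySem.Str.split₀ q.2
        if ((PySem.List.enumerate templates).foldl pvStepA PySem.Dict.empty).contains ((logL.length : Int)) then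
          acc ++ [[q.1 + 1, pvGetGroupid logL
            (((PySem.List.enumerate templates).foldl pvStepA PySem.Dict.empty).getD ((logL.length : Int)) [])]]
        else acc ++ [[q.1 + 1, -1]])
        = acc ++ [pvValA templates q] := by
      by_cases hc : ((PySem.List.enumerate templates).foldl pvStepA PySem.Dict.empty).contains
          (((PySem.Str.split₀ q.2).length : Int)) = true
      · simp only [pvValA, hc, if_true]
      · simp only [pvValA, Bool.not_eq_true] at hc ⊢
        simp only [hc, Bool.false_eq_true, if_false]
    rw [hbody, ih]
    simp

lemma pv_foldB (templates : List String) (l : List (Int × String)) :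
    ∀ (acc : List (List Int)),
      l.foldl (fun acc p =>
        let toks := PySem.Str.split₀ p.2
        match ((PySem.List.enumerate templates).foldl pvStepB PySem.Dict.empty).get? ((toks.length : Int)) with
        | none => acc ++ [[p.1 + 1, -1]]
        | some g =>
          let counts := (PySem.List.enumerate toks).foldl (fun cs q =>
              (g.2.getD (q.1, q.2) []).foldl
                (fun (cs : PySem.Dict Int Int) j => cs.modify j 0 (· + 1)) cs) PySem.Dict.empty
          let best := (PySem.List.pyRange 1 ((g.1.length : Int))).foldl (fun (b : Int × Int) j =>
              let c := counts.getD j 0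
              if c > b.2 then (j, c) else b) ((0 : Int), counts.getD 0 0)
          acc ++ [[p.1 + 1, PySem.List.pyGetD g.1 best.1 (-1)]]) acc
      = acc ++ l.map (pvValB templates) := by
  induction l with
  | nil => intro acc; simp
  | cons q t ih =>
    intro acc
    rw [List.foldl_cons, List.map_cons]
    have hbody : ∀ (acc : List (List Int)), (match ((PySem.List.enumerate templates).foldl pvStepB PySem.Dict.empty).get?
            (((PySem.Str.split₀ q.2).length : Int)) with
        | none => acc ++ [[q.1 + 1, -1]]
        | some g =>
          let counts := (PySem.List.enumerate (PySem.Str.split₀ q.2)).foldl (fun cs r =>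
              (g.2.getD (r.1, r.2) []).foldl
                (fun (cs : PySem.Dict Int Int) j => cs.modify j 0 (· + 1)) cs) PySem.Dict.empty
          let best := (PySem.List.pyRange 1 ((g.1.length : Int))).foldl (fun (b : Int × Int) j =>
              let c := counts.getD j 0
              if c > b.2 then (j, c) else b) ((0 : Int), counts.getD 0 0)
          acc ++ [[q.1 + 1, PySem.List.pyGetD g.1 best.1 (-1)]])
        = acc ++ [pvValB templates q] := by
      intro acc
      cases hg : ((PySem.List.enumerate templates).foldl pvStepB PySem.Dict.empty).get?
          (((PySem.Str.split₀ q.2).length : Int)) with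
      | none => simp only [pvValB, hg]
      | some g => simp only [pvValB, hg]
    rw [hbody, ih]
    simp

-- per-log agreement of the two per-line values
set_option maxHeartbeats 2000000 in
lemma pvPerLog (templates : List String) (p : Int × String) :
    pvValA templates p = pvValB templates p := by
  have hB := pvB_build (PySem.List.enumerate templates) ((PySem.Str.split₀ p.2).length : Int)
  cases hD : ((PySem.List.enumerate templates).foldl pvStepB PySem.Dict.empty).get?
      ((PySem.Str.split₀ p.2).length : Int) with
  | none =>
    rw [hD] at hB
    have hc : ((PySem.List.enumerate templates).foldl pvStepA PySem.Dict.empty).contains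
        ((PySem.Str.split₀ p.2).length : Int) = false := by
      rw [pvA_contains, hB]
      simp
    simp only [pvValA, pvValB, hD, hc, Bool.false_eq_true, if_false]
  | some g =>
    rw [hD] at hB
    obtain ⟨hne, hfst, hspec⟩ := hB
    obtain ⟨G0, Gt, hGcons⟩ : ∃ G0 Gt,
        pvGroupL (PySem.List.enumerate templates) ((PySem.Str.split₀ p.2).length : Int) = G0 :: Gt := by
      cases hG : pvGroupL (PySem.List.enumerate templates) ((PySem.Str.split₀ p.2).length : Int) with
      | nil => exact absurd hG hne
      | cons a b => exact ⟨a, b, rfl⟩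
    have hisE : (pvGroupL (PySem.List.enumerate templates) ((PySem.Str.split₀ p.2).length : Int)).isEmpty = false := by
      rw [hGcons]; rfl
    have hc : ((PySem.List.enumerate templates).foldl pvStepA PySem.Dict.empty).contains
        ((PySem.Str.split₀ p.2).length : Int) = true := by
      rw [pvA_contains, hisE]
      simp
    have hgetD : ((PySem.List.enumerate templates).foldl pvStepA PySem.Dict.empty).getD
        ((PySem.Str.split₀ p.2).length : Int) []
        = pvGroupL (PySem.List.enumerate templates) ((PySem.Str.split₀ p.2).length : Int) := by
      rw [pvA_getD]
      simp
    have hlen : ∀ r ∈ pvGroupL (PySem.List.enumerate templates) ((PySem.Str.split₀ p.2).length : Int),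
        r.2.length = (PySem.Str.split₀ p.2).length := by
      intro r hr
      have := List.of_mem_filter hr
      simpa using this
    rw [hGcons] at hfst hspec hlen
    have hcnt := fun (j : Nat) (hj : j < (G0 :: Gt).length) =>
      pvCounts_getD (PySem.Str.split₀ p.2) (G0 :: Gt) g.2 hspec hlen j hj
    simp only [pvValA, pvValB, hD, hc, if_true]
    congr 1
    rw [hgetD, pvGetGroupid_eq, hGcons, List.foldl_cons]
    have hs0 : pvScore (PySem.Str.split₀ p.2) G0.2 > -1 := by
      unfold pvScore
      have := Int.natCast_nonneg ((PySem.List.enumerate (PySem.Str.split₀ p.2)).countP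
        (fun q => q.2 == PySem.List.pyGetD G0.2 q.1 "" && !pvStar (PySem.List.pyGetD G0.2 q.1 "")))
      omega
    rw [if_pos hs0]
    have hlen1 : ((g.1.length : Nat) : Int) = (1 : Int) + ((Gt.length : Nat) : Int) := by
      rw [hfst]
      simp
      push_cast
      ring
    rw [hlen1]
    have hc0 : ((PySem.List.enumerate (PySem.Str.split₀ p.2)).foldl (fun cs q =>
          (g.2.getD (q.1, q.2) []).foldl
            (fun (cs : PySem.Dict Int Int) j => cs.modify j 0 (· + 1)) cs) PySem.Dict.empty).getD 0 0
        = pvScore (PySem.Str.split₀ p.2) G0.2 := by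
      simpa using hcnt 0 (by simp)
    rw [hc0]
    have hbj : PySem.List.pyGetD g.1 0 (-1) = G0.1 := by
      rw [hfst, List.map_cons]
      rw [PySem.List.pyGetD_eq_getElem _ _ (by omega) (by simp)]
      simp
    have hfam : ∀ (i : Nat) (hi : i < Gt.length),
        (fun j => ((PySem.List.enumerate (PySem.Str.split₀ p.2)).foldl (fun cs q =>
            (g.2.getD (q.1, q.2) []).foldl
              (fun (cs : PySem.Dict Int Int) j => cs.modify j 0 (· + 1)) cs) PySem.Dict.empty).getD j 0)
          ((1 : Int) + i) = (fun templ => pvScore (PySem.Str.split₀ p.2) templ.2) Gt[i]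
        ∧ PySem.List.pyGetD g.1 ((1 : Int) + i) (-1) = (Gt[i]).1 := by
      intro i hi
      constructor
      · have hj : i + 1 < (G0 :: Gt).length := by simpa using Nat.succ_lt_succ hi
        have hx := hcnt (i + 1) hj
        have harg : (((i + 1 : Nat)) : Int) = (1 : Int) + (i : Int) := by push_cast; ring
        rw [harg] at hx
        dsimp only
        rw [hx]
        congr 1
      · rw [hfst, List.map_cons]
        have h0 : (0 : Int) ≤ (1 : Int) + (i : Int) := by omega
        have h1 : (1 : Int) + (i : Int) < (((G0.1 :: Gt.map (fun r => r.1)).length : Nat) : Int) := by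
          simp; omega
        rw [PySem.List.pyGetD_eq_getElem _ _ h0 h1]
        have ht : ((1 : Int) + (i : Int)).toNat = i + 1 := by omega
        simp only [ht]
        simp
    rw [pvSel (fun templ => pvScore (PySem.Str.split₀ p.2) templ.2)
      (fun j => ((PySem.List.enumerate (PySem.Str.split₀ p.2)).foldl (fun cs q =>
          (g.2.getD (q.1, q.2) []).foldl
            (fun (cs : PySem.Dict Int Int) j => cs.modify j 0 (· + 1)) cs) PySem.Dict.empty).getD j 0)
      g.1 Gt 1 (pvScore (PySem.Str.split₀ p.2) G0.2) G0.1 0 hbj hfam]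

-- ===== VERDICT (by name: the statement is the Claim_ definition above) =====
theorem matchTempLog_spec : Claim_equal_matchTempLog := by
  intro templates logs _
  unfold Spec_matchTempLog matchTempLog matchTempLog_alt
  rw [pv_foldA, pv_foldB]
  simp only [List.nil_append]
  exact List.map_congr_left (fun p _ => pvPerLog templates p)
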